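-- pv_equiv track=rewrite | github.com/gnallie-ramp/gary-bot | utils/account_resolver.py | best_contact_match
-- ===== SOURCE A (Python) =====
-- def best_contact_match(poc_name: str, contacts: list[dict]) -> dict | None:
--     """Return the contact from *contacts* whose name is the closest match
--     to *poc_name*, or ``None`` if nothing is close enough.
--
--     Uses simple substring matching — good enough for "Sarah Chen" →
--     ``{name: "Sarah Chen", email: "sarah@acme.com", ...}``.
--     """
--     if not poc_name or not contacts:
--         return None
--
--     poc_lower = poc_name.lower().strip()
--
--     # Exact match first
--     for c in contacts:
--         if c.get("name", "").lower().strip() == poc_lower: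
--             return c
--
--     # Substring match
--     for c in contacts:
--         c_name = c.get("name", "").lower().strip()
--         if poc_lower in c_name or c_name in poc_lower:
--             return c
--
--     # Last-name match
--     poc_parts = poc_lower.split()
--     if poc_parts:
--         last = poc_parts[-1]
--         for c in contacts:
--             if last in c.get("name", "").lower():
--                 return c
--
--     return None
-- ===== SOURCE B (Python) =====
-- def best_contact_match(poc_name: str, contacts: list[dict]) -> dict | None:
--     """Single pass: rank every contact with a priority tier (0 = exact
--     normalized match, 1 = substring either way, 2 = last name appears in
--     the lowercased name, 3 = no match) and keep the earliest contact with
--     the strictly smallest tier."""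
--     if not poc_name or not contacts:
--         return None
--
--     poc_lower = poc_name.lower().strip()
--     parts = poc_lower.split()
--     last = parts[-1] if parts else None
--
--     def tier(c):
--         name_lower = c.get("name", "").lower()
--         name_norm = name_lower.strip()
--         if name_norm == poc_lower:
--             return 0
--         if poc_lower in name_norm or name_norm in poc_lower:
--             return 1
--         if last is not None and last in name_lower:
--             return 2
--         return 3
--
--     best_tier = 3
--     best = None
--     for c in contacts:
--         t = tier(c)
--         if t < best_tier:
--             best_tier = t
--             best = c
--     return best
-- ===== Notes on version B (the rewrite author's own statement) =====
-- stated objective: alternative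
-- what changed: Replaces A's three sequential scans (exact, substring, last-name) by a single pass that ranks each contact with a priority tier 0/1/2/3 and keeps the earliest contact with the strictly smallest tier.
import Mathlib
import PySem

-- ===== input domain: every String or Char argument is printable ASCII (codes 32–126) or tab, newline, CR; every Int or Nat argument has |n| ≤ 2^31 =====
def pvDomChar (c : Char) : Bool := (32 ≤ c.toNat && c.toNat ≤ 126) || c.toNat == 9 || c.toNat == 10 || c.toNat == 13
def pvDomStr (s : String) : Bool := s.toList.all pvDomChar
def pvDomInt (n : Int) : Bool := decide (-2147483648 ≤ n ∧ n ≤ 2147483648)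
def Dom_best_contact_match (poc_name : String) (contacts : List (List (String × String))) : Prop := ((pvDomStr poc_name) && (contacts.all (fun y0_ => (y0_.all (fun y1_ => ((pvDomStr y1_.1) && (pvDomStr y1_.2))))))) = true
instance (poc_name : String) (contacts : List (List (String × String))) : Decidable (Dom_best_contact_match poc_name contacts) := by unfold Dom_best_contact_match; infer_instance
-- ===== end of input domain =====

-- B replaces A's three sequential scans by a single pass that ranks each contact
-- with a priority tier (0 exact, 1 substring, 2 last-name, 3 none) and keeps the
-- earliest contact at the smallest tier; same cost, different decomposition.


-- ===== PORT A =====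
-- c.get("name", "") : dict lookup with default (dict built from the assoc list)
def pvName (c : List (String × String)) : String :=
  PySem.Dict.getD (PySem.Dict.ofList c) "name" ""

-- poc_lower = poc_name.lower().strip() is written out inline at each use
def best_contact_match (poc_name : String) (contacts : List (List (String × String))) : Option (List (String × String)) :=
  if poc_name = "" ∨ contacts = [] then none
  else
    -- Exact match first
    match contacts.find? (fun c => PySem.Str.strip (PySem.Str.lower (pvName c)) == PySem.Str.strip (PySem.Str.lower poc_name)) with
    | some c => some c
    | none =>
      -- Substring match
      match contacts.find? (fun c =>
          PySem.Str.isIn (PySem.Str.strip (PySem.Str.lower poc_name)) (PySem.Str.strip (PySem.Str.lower (pvName c)))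
          || PySem.Str.isIn (PySem.Str.strip (PySem.Str.lower (pvName c))) (PySem.Str.strip (PySem.Str.lower poc_name))) with
      | some c => some c
      | none =>
        -- Last-name match (poc_parts = poc_lower.split(); last = poc_parts[-1])
        if PySem.Str.split₀ (PySem.Str.strip (PySem.Str.lower poc_name)) = [] then none
        else
          contacts.find? (fun c =>
            PySem.Str.isIn (PySem.List.pyGetD (PySem.Str.split₀ (PySem.Str.strip (PySem.Str.lower poc_name))) (-1) "")
              (PySem.Str.lower (pvName c)))

-- ===== PORT B =====
-- tier(c): 0 = exact normalized match, 1 = substring either way, 2 = last token in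
-- lowercased name, 3 = no match (name_lower / name_norm written out inline)
def pvTier (poc_lower : String) (lastTok : Option String) (c : List (String × String)) : Nat :=
  if PySem.Str.strip (PySem.Str.lower (pvName c)) = poc_lower then 0
  else if PySem.Str.isIn poc_lower (PySem.Str.strip (PySem.Str.lower (pvName c)))
       || PySem.Str.isIn (PySem.Str.strip (PySem.Str.lower (pvName c))) poc_lower then 1
  else match lastTok with
    | some l => if PySem.Str.isIn l (PySem.Str.lower (pvName c)) then 2 else 3
    | none => 3

def best_contact_match_alt (poc_name : String) (contacts : List (List (String × String))) : Option (List (String × String)) :=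
  if poc_name = "" ∨ contacts = [] then none
  else
    -- single pass keeping (best_tier, best); last = parts[-1] if parts else None
    (contacts.foldl
      (fun (st : Nat × Option (List (String × String))) c =>
        if pvTier (PySem.Str.strip (PySem.Str.lower poc_name))
            (if PySem.Str.split₀ (PySem.Str.strip (PySem.Str.lower poc_name)) = [] then none
             else some (PySem.List.pyGetD (PySem.Str.split₀ (PySem.Str.strip (PySem.Str.lower poc_name))) (-1) "")) c < st.1
        then (pvTier (PySem.Str.strip (PySem.Str.lower poc_name))
            (if PySem.Str.split₀ (PySem.Str.strip (PySem.Str.lower poc_name)) = [] then none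
             else some (PySem.List.pyGetD (PySem.Str.split₀ (PySem.Str.strip (PySem.Str.lower poc_name))) (-1) "")) c, some c)
        else st)
      (3, none)).2

-- ===== PRECONDITION & SPEC =====
def Spec_best_contact_match (poc_name : String) (contacts : List (List (String × String))) (out : Option (List (String × String))) : Prop := out = best_contact_match_alt poc_name contacts
instance (poc_name : String) (contacts : List (List (String × String))) (out : Option (List (String × String))) : Decidable (Spec_best_contact_match poc_name contacts out) := by unfold Spec_best_contact_match; infer_instance

-- ===== CLAIM (what is proved, stated in full; the proofs are below) =====
def Claim_equal_best_contact_match : Prop := ∀ (poc_name : String) (contacts : List (List (String × String))), Dom_best_contact_match poc_name contacts → Spec_best_contact_match poc_name contacts (best_contact_match poc_name contacts)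

-- ===== LEMMAS AND PROOFS =====

theorem pvFind?_congr {α : Type} (p q : α → Bool) (l : List α)
    (h : ∀ a ∈ l, p a = q a) : l.find? p = l.find? q := by
  induction l with
  | nil => rfl
  | cons x xs ih =>
    simp only [List.find?]
    rw [h x (by simp)]
    cases q x with
    | true => rfl
    | false => exact ih (fun a ha => h a (by simp [ha]))

theorem pvFoldlMin_le_init (l : List Nat) (b : Nat) : l.foldl Nat.min b ≤ b := by
  induction l generalizing b with
  | nil => simp
  | cons x xs ih => exact le_trans (ih (Nat.min b x)) (Nat.min_le_left _ _)

theorem pvFoldlMin_le_mem : ∀ (l : List Nat) (b x : Nat), x ∈ l → l.foldl Nat.min b ≤ x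
  | y :: ys, b, x, hx => by
    rcases List.mem_cons.mp hx with h | h
    · subst h
      exact le_trans (pvFoldlMin_le_init ys _) (Nat.min_le_right _ _)
    · exact pvFoldlMin_le_mem ys (Nat.min b y) x h

theorem pvFoldlMin_mem : ∀ (l : List Nat) (b : Nat), l.foldl Nat.min b = b ∨ l.foldl Nat.min b ∈ l
  | [], _ => Or.inl rfl
  | x :: xs, b => by
    rcases pvFoldlMin_mem xs (Nat.min b x) with h | h
    · simp only [List.foldl] at *
      rcases Nat.le_total b x with hbx | hxb
      · left
        rw [h]
        exact min_eq_left hbx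
      · right
        rw [h]
        have hx : Nat.min b x = x := min_eq_right hxb
        rw [hx]
        exact List.mem_cons_self ..
    · right
      simp only [List.foldl]
      exact List.mem_cons_of_mem _ h

-- single-pass loop = "first element attaining the overall minimum tier"
theorem pvLoop_spec {α : Type} (t : α → Nat) (l : List α) (bt : Nat) (best : Option α) :
    (l.foldl (fun (st : Nat × Option α) c => if t c < st.1 then (t c, some c) else st) (bt, best)).2
      = (if (l.map t).foldl Nat.min bt = bt then best
         else l.find? (fun c => t c == (l.map t).foldl Nat.min bt)) := by
  induction l generalizing bt best with
  | nil => simp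
  | cons c rest ih =>
    simp only [List.foldl, List.map, List.find?]
    by_cases hc : t c < bt
    · rw [if_pos hc, ih]
      have hmin : Nat.min bt (t c) = t c := min_eq_right (by omega)
      rw [hmin]
      have hm_le : (rest.map t).foldl Nat.min (t c) ≤ t c := pvFoldlMin_le_init _ _
      have hm_ne : ¬ (rest.map t).foldl Nat.min (t c) = bt := by omega
      rw [if_neg hm_ne]
      by_cases he : (rest.map t).foldl Nat.min (t c) = t c
      · rw [if_pos he, he, beq_self_eq_true]
      · rw [if_neg he]
        have hb : (t c == (rest.map t).foldl Nat.min (t c)) = false := by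
          simp only [beq_eq_false_iff_ne, ne_eq]
          omega
        rw [hb]
    · rw [if_neg hc, ih]
      have hmin : Nat.min bt (t c) = bt := min_eq_left (by omega)
      rw [hmin]
      by_cases he : (rest.map t).foldl Nat.min bt = bt
      · rw [if_pos he, if_pos he]
      · rw [if_neg he, if_neg he]
        have hle : (rest.map t).foldl Nat.min bt ≤ bt := pvFoldlMin_le_init _ _
        have hb : (t c == (rest.map t).foldl Nat.min bt) = false := by
          simp only [beq_eq_false_iff_ne, ne_eq]
          omega
        rw [hb]

theorem pvTier_le_three (pl : String) (lt : Option String) (c : List (String × String)) :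
    pvTier pl lt c ≤ 3 := by
  cases lt <;> simp only [pvTier] <;> split_ifs <;> omega

theorem pvTier_eq_zero_iff (pl : String) (lt : Option String) (c : List (String × String)) :
    pvTier pl lt c = 0 ↔ PySem.Str.strip (PySem.Str.lower (pvName c)) = pl := by
  cases lt <;> simp only [pvTier] <;> split_ifs <;> simp_all

theorem pvTier_le_one_iff (pl : String) (lt : Option String) (c : List (String × String)) :
    (pvTier pl lt c ≤ 1) ↔
      (PySem.Str.isIn pl (PySem.Str.strip (PySem.Str.lower (pvName c)))
        || PySem.Str.isIn (PySem.Str.strip (PySem.Str.lower (pvName c))) pl) = true := by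
  have hrefl : PySem.Str.strip (PySem.Str.lower (pvName c)) = pl →
      PySem.Str.isIn pl (PySem.Str.strip (PySem.Str.lower (pvName c))) = true := by
    intro h
    rw [h]
    exact (PySem.Str.isIn_iff_infix pl pl).mpr (List.infix_refl _)
  cases lt <;> simp only [pvTier] <;> split_ifs <;> simp_all

theorem pvTier_eq_two_iff (pl : String) (l : String) (c : List (String × String))
    (h01 : ¬ pvTier pl (some l) c ≤ 1) :
    pvTier pl (some l) c = 2 ↔ PySem.Str.isIn l (PySem.Str.lower (pvName c)) = true := by
  simp only [pvTier] at h01 ⊢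
  split_ifs at h01 ⊢ <;> simp_all

theorem pvTier_ne_two_of_none (pl : String) (c : List (String × String)) :
    pvTier pl none c ≠ 2 := by
  simp only [pvTier]
  split_ifs <;> simp

theorem best_contact_match_spec_aux (poc_name : String) (contacts : List (List (String × String))) :
    best_contact_match poc_name contacts = best_contact_match_alt poc_name contacts := by
  unfold best_contact_match best_contact_match_alt
  by_cases hg : poc_name = "" ∨ contacts = []
  · rw [if_pos hg, if_pos hg]
  · rw [if_neg hg, if_neg hg]
    rw [pvLoop_spec]
    set pl := PySem.Str.strip (PySem.Str.lower poc_name) with hpl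
    set parts := PySem.Str.split₀ pl with hparts
    set lt : Option String := if parts = [] then none else some (PySem.List.pyGetD parts (-1) "") with hlt
    set t : List (String × String) → Nat := pvTier pl lt with ht
    set m : Nat := (contacts.map t).foldl Nat.min 3 with hm
    have hm_le : m ≤ 3 := pvFoldlMin_le_init _ _
    have hm_le_mem : ∀ c ∈ contacts, m ≤ t c := by
      intro c hc
      exact pvFoldlMin_le_mem _ _ _ (List.mem_map_of_mem hc)
    have hm_mem : m = 3 ∨ ∃ c ∈ contacts, t c = m := by
      rcases pvFoldlMin_mem (contacts.map t) 3 with h | h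
      · left; exact h
      · right
        rcases List.mem_map.mp h with ⟨c, hc, hcm⟩
        exact ⟨c, hc, hcm⟩
    clear_value t m
    -- stage 0: exact match = tier 0
    have hfind0 : contacts.find? (fun c => PySem.Str.strip (PySem.Str.lower (pvName c)) == pl)
        = contacts.find? (fun c => t c == 0) := by
      apply pvFind?_congr
      intro c _
      simp [ht, pvTier_eq_zero_iff pl lt c]
    rw [hfind0]
    cases h0 : contacts.find? (fun c => t c == 0) with
    | some c0 =>
      have hc0 : c0 ∈ contacts := List.mem_of_find?_eq_some h0
      have ht0 : t c0 = 0 := by simpa using List.find?_some h0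
      have hm0 : m = 0 := by have := hm_le_mem c0 hc0; omega
      rw [if_neg (show ¬ m = 3 by omega), hm0]
      exact h0.symm
    | none =>
      have hne0 : ∀ c ∈ contacts, t c ≠ 0 := by
        intro c hc
        have := List.find?_eq_none.mp h0 c hc
        simpa using this
      -- stage 1: substring match = tier 1
      have hfind1 : contacts.find? (fun c =>
            PySem.Str.isIn pl (PySem.Str.strip (PySem.Str.lower (pvName c)))
            || PySem.Str.isIn (PySem.Str.strip (PySem.Str.lower (pvName c))) pl)
          = contacts.find? (fun c => t c == 1) := by
        apply pvFind?_congr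
        intro c hc
        have h1iff := pvTier_le_one_iff pl lt c
        have hne := hne0 c hc
        rw [← ht] at h1iff
        by_cases h : t c = 1
        · simp only [h, beq_self_eq_true]
          exact h1iff.mp (by omega)
        · have hgt : ¬ t c ≤ 1 := by omega
          have hr : (t c == 1) = false := by simp [h]
          rw [hr]
          have := (not_iff_not.mpr h1iff).mp hgt
          simpa using this
      rw [hfind1]
      cases h1 : contacts.find? (fun c => t c == 1) with
      | some c1 =>
        have hc1 : c1 ∈ contacts := List.mem_of_find?_eq_some h1
        have ht1 : t c1 = 1 := by simpa using List.find?_some h1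
        have hm1 : m = 1 := by
          have h1' := hm_le_mem c1 hc1
          rcases hm_mem with h | ⟨c, hc, hcm⟩
          · omega
          · have := hne0 c hc; omega
        rw [if_neg (show ¬ m = 3 by omega), hm1]
        exact h1.symm
      | none =>
        have hne1 : ∀ c ∈ contacts, ¬ t c ≤ 1 := by
          intro c hc
          have h1' := List.find?_eq_none.mp h1 c hc
          have h0' := hne0 c hc
          simp only [beq_iff_eq] at h1'
          omega
        -- stage 2: last-name match = tier 2
        by_cases hp : parts = []
        · -- no last token: tier 2 impossible, both sides give none
          rw [if_pos hp]
          have hlt' : lt = none := by rw [hlt, if_pos hp]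
          have hm3 : m = 3 := by
            rcases hm_mem with h | ⟨c, hc, hcm⟩
            · exact h
            · have h2 := hne1 c hc
              have h3 := pvTier_le_three pl lt c
              have h4 : t c ≠ 2 := by
                rw [ht, hlt']
                exact pvTier_ne_two_of_none pl c
              rw [← ht] at h3
              omega
          rw [if_pos hm3]
        · rw [if_neg hp]
          have hlt' : lt = some (PySem.List.pyGetD parts (-1) "") := by rw [hlt, if_neg hp]
          have hfind2 : contacts.find? (fun c =>
                PySem.Str.isIn (PySem.List.pyGetD parts (-1) "") (PySem.Str.lower (pvName c)))
              = contacts.find? (fun c => t c == 2) := by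
            apply pvFind?_congr
            intro c hc
            have h01 : ¬ pvTier pl (some (PySem.List.pyGetD parts (-1) "")) c ≤ 1 := by
              have := hne1 c hc
              rw [ht, hlt'] at this
              exact this
            have h2iff := pvTier_eq_two_iff pl (PySem.List.pyGetD parts (-1) "") c h01
            rw [ht, hlt']
            by_cases h : pvTier pl (some (PySem.List.pyGetD parts (-1) "")) c = 2
            · simp only [h, beq_self_eq_true]
              exact h2iff.mp h
            · have hr : (pvTier pl (some (PySem.List.pyGetD parts (-1) "")) c == 2) = false := by
                simp [h]
              rw [hr]
              have := (not_iff_not.mpr h2iff).mp h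
              simpa using this
          rw [hfind2]
          cases h2 : contacts.find? (fun c => t c == 2) with
          | some c2 =>
            have hc2 : c2 ∈ contacts := List.mem_of_find?_eq_some h2
            have ht2 : t c2 = 2 := by simpa using List.find?_some h2
            have hm2 : m = 2 := by
              have h2' := hm_le_mem c2 hc2
              rcases hm_mem with h | ⟨c, hc, hcm⟩
              · omega
              · have := hne1 c hc; omega
            rw [if_neg (show ¬ m = 3 by omega), hm2]
            exact h2.symm
          | none =>
            have hm3 : m = 3 := by
              rcases hm_mem with h | ⟨c, hc, hcm⟩
              · exact h
              · have ha := hne1 c hc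
                have hb := pvTier_le_three pl lt c
                rw [← ht] at hb
                have h2' := List.find?_eq_none.mp h2 c hc
                simp only [beq_iff_eq] at h2'
                omega
            rw [if_pos hm3]

-- ===== VERDICT (by name: the statement is the Claim_ definition above) =====
theorem best_contact_match_spec : Claim_equal_best_contact_match := by
  intro poc_name contacts _
  exact best_contact_match_spec_aux poc_name contacts
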